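-- pv_equiv track=rewrite | github.com/InduChaurasia/P_AOC_2024 | src/__2025__/day8.py | find_circuits_after_n_joins
-- ===== SOURCE A (Python) =====
-- import math
--
-- def join_boxes(box1, box2, circuits, box_circuit, circuit_count):
--     c1 = box_circuit[box1] if box1 in box_circuit else ''
--     c2 = box_circuit[box2] if box2 in box_circuit else ''
--     modified_circuit = None
--     if c1 and c1 == c2:
--         return modified_circuit, circuit_count
--     elif not c1 and not c2:
--         circuit_name = 'C'+str(circuit_count)
--         circuits[circuit_name] = [box1, box2]
--         box_circuit[box1] = circuit_name
--         box_circuit[box2] = circuit_name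
--         circuit_count += 1
--         modified_circuit = circuit_name
--     elif not c1:
--         circuits[c2].append(box1)
--         box_circuit[box1] = c2
--         modified_circuit = c2
--     elif not c2:
--         circuits[c1].append(box2)
--         box_circuit[box2] = c1
--         modified_circuit = c1
--     else:
--         l1, l2 = len(circuits[c1]), len(circuits[c2])
--         to_circuit = c1 if l1 > l2 else c2
--         from_circuit = c1 if l1 <= l2 else c2
--         from_boxes = circuits[from_circuit]
--         circuits[to_circuit] = circuits[to_circuit]+from_boxes
--         modified_circuit = to_circuit
--         del circuits[from_circuit]
--         for b in from_boxes:
--             box_circuit[b] = to_circuit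
--     return modified_circuit, circuit_count
--
-- def find_circuits_after_n_joins(n, distances):
--     circuits = {}
--     box_circuit = {}
--     circuit_count = 1
--     join = 0
--     for d in sorted(distances.keys()):
--         if join < n:
--             join += 1
--             box1, box2 = distances[d]
--             _, circuit_count = join_boxes(
--                 box1, box2, circuits, box_circuit, circuit_count)
--     circuit_lengths = []
--     for c in circuits.values():
--         circuit_lengths.append(len(c))
--     circuit_lengths.sort()
--     last_three = circuit_lengths[len(circuit_lengths)-3:len(circuit_lengths)]
--     return math.prod(last_three)
-- ===== SOURCE B (Python) =====
-- import math
--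
--
-- def find_circuits_after_n_joins(n, distances):
--     # One flat list of circuits (lists of boxes); no name dict, no box->name
--     # index: endpoints are located by scanning the circuits directly.
--     comps = []
--     for d in sorted(distances)[:max(n, 0)]:
--         a, b = distances[d]
--         i = next((k for k, c in enumerate(comps) if a in c), None)
--         j = next((k for k, c in enumerate(comps) if b in c), None)
--         if i is None and j is None:
--             comps.append([a, b])
--         elif i is None:
--             comps[j].append(a)
--         elif j is None:
--             comps[i].append(b)
--         elif i != j:
--             # extend the larger circuit with the smaller one
--             if len(comps[i]) > len(comps[j]):
--                 comps[i] = comps[i] + comps[j]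
--                 del comps[j]
--             else:
--                 comps[j] = comps[j] + comps[i]
--                 del comps[i]
--     sizes = sorted(len(c) for c in comps)
--     return math.prod(sizes[len(sizes) - 3:])
-- ===== Notes on version B (the rewrite author's own statement) =====
-- stated objective: simpler
-- what changed: Replaces the named-circuit dict plus box->name index dict and the name-relabelling merge with a single flat list of circuits scanned directly for each endpoint; the final answer is the product of the last three sorted sizes taken with one slice.
import Mathlib
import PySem

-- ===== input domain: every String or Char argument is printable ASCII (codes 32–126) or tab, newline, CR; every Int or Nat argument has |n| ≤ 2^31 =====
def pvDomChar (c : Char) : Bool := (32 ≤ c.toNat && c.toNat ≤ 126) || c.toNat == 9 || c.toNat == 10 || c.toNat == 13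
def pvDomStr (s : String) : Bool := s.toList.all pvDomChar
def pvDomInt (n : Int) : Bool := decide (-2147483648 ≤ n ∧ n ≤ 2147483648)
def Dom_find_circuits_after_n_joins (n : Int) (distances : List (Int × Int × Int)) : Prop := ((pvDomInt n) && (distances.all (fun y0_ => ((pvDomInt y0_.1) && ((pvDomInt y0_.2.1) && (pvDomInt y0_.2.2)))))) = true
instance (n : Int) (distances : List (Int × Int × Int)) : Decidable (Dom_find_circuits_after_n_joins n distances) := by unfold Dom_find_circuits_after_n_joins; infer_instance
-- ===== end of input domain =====

-- B replaces A's two dicts (circuit name -> member list, box -> circuit name) and the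
-- name-relabelling merge by a single flat list of circuits scanned for each endpoint
-- (objective: simpler; same observable result on every input).

-- ===== PORT A =====
def pvJoinBoxes (box1 box2 : Int) (circuits : PySem.Dict String (List Int))
    (box_circuit : PySem.Dict Int String) (circuit_count : Int) :
    PySem.Dict String (List Int) × PySem.Dict Int String × Int :=
  let c1 := if box_circuit.contains box1 then box_circuit.getD box1 "" else ""
  let c2 := if box_circuit.contains box2 then box_circuit.getD box2 "" else ""
  if c1 ≠ "" ∧ c1 = c2 then
    (circuits, box_circuit, circuit_count)
  else if c1 = "" ∧ c2 = "" then
    let circuit_name := "C" ++ PySem.Int.toStr circuit_count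
    (circuits.insert circuit_name [box1, box2],
     (box_circuit.insert box1 circuit_name).insert box2 circuit_name,
     circuit_count + 1)
  else if c1 = "" then
    -- circuits[c2].append(box1): in-place update of the list stored at key c2
    (circuits.insert c2 (circuits.getD c2 [] ++ [box1]),
     box_circuit.insert box1 c2, circuit_count)
  else if c2 = "" then
    (circuits.insert c1 (circuits.getD c1 [] ++ [box2]),
     box_circuit.insert box2 c1, circuit_count)
  else
    let l1 := (circuits.getD c1 []).length
    let l2 := (circuits.getD c2 []).length
    let to_circuit := if l1 > l2 then c1 else c2
    let from_circuit := if l1 ≤ l2 then c1 else c2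
    let from_boxes := circuits.getD from_circuit []
    let circuits1 := circuits.insert to_circuit (circuits.getD to_circuit [] ++ from_boxes)
    let circuits2 := circuits1.erase from_circuit
    let box_circuit2 := from_boxes.foldl (fun bc bx => bc.insert bx to_circuit) box_circuit
    (circuits2, box_circuit2, circuit_count)

-- body of A's `for d in sorted(distances.keys())` loop
def pvLoopA (n : Int) (dmap : PySem.Dict Int (Int × Int))
    (st : PySem.Dict String (List Int) × PySem.Dict Int String × Int × Int) (d : Int) :
    PySem.Dict String (List Int) × PySem.Dict Int String × Int × Int :=
  if st.2.2.2 < n then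
    let bx := dmap.getD d (0, 0)
    let r := pvJoinBoxes bx.1 bx.2 st.1 st.2.1 st.2.2.1
    (r.1, r.2.1, r.2.2, st.2.2.2 + 1)
  else st

def find_circuits_after_n_joins (n : Int) (distances : List (Int × Int × Int)) : Int :=
  let dmap := PySem.Dict.ofList (distances.map (fun t => (t.1, (t.2.1, t.2.2))))
  let fin := (PySem.List.sorted dmap.keys (fun x => x) false).foldl (pvLoopA n dmap)
    (PySem.Dict.empty, PySem.Dict.empty, 1, 0)
  let circuit_lengths := fin.1.values.foldl (fun acc c => acc ++ [PySem.List.len c]) ([] : List Int)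
  let sorted_lengths := PySem.List.sorted circuit_lengths (fun x => x) false
  let last_three := PySem.List.slice sorted_lengths
    (some (PySem.List.len sorted_lengths - 3)) (some (PySem.List.len sorted_lengths))
  last_three.prod

-- ===== PORT B =====
def pvJoin (comps : List (List Int)) (a b : Int) : List (List Int) :=
  match comps.findIdx? (fun c => c.contains a), comps.findIdx? (fun c => c.contains b) with
  | none, none => comps ++ [[a, b]]
  | none, some j => comps.set j (comps.getD j [] ++ [a])
  | some i, none => comps.set i (comps.getD i [] ++ [b])
  | some i, some j =>
      if i = j then comps
      else if (comps.getD i []).length > (comps.getD j []).length then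
        (comps.set i (comps.getD i [] ++ comps.getD j [])).eraseIdx j
      else
        (comps.set j (comps.getD j [] ++ comps.getD i [])).eraseIdx i

-- body of B's loop over the n smallest keys
def pvLoopB (dmap : PySem.Dict Int (Int × Int)) (comps : List (List Int)) (d : Int) :
    List (List Int) :=
  let bx := dmap.getD d (0, 0)
  pvJoin comps bx.1 bx.2

def find_circuits_after_n_joins_alt (n : Int) (distances : List (Int × Int × Int)) : Int :=
  let dmap := PySem.Dict.ofList (distances.map (fun t => (t.1, (t.2.1, t.2.2))))
  let keys := PySem.List.sorted dmap.keys (fun x => x) false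
  let comps := (PySem.List.slice keys none (some (max n 0))).foldl (pvLoopB dmap) []
  let sizes := PySem.List.sorted (comps.map (fun c => PySem.List.len c)) (fun x => x) false
  (PySem.List.slice sizes (some (PySem.List.len sizes - 3)) none).prod

-- ===== PRECONDITION & SPEC =====
def Spec_find_circuits_after_n_joins (n : Int) (distances : List (Int × Int × Int)) (out : Int) : Prop := out = find_circuits_after_n_joins_alt n distances
instance (n : Int) (distances : List (Int × Int × Int)) (out : Int) : Decidable (Spec_find_circuits_after_n_joins n distances out) := by unfold Spec_find_circuits_after_n_joins; infer_instance

-- ===== CLAIM (what is proved, stated in full; the proofs are below) =====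
def Claim_equal_find_circuits_after_n_joins : Prop := ∀ (n : Int) (distances : List (Int × Int × Int)), Dom_find_circuits_after_n_joins n distances → Spec_find_circuits_after_n_joins n distances (find_circuits_after_n_joins n distances)

-- ===== LEMMAS AND PROOFS =====

theorem pv_toDigitsCore_shift (b : Nat) : ∀ (f n : Nat) (ds : List Char),
    Nat.toDigitsCore b f n ds = Nat.toDigitsCore b f n [] ++ ds := by
  intro f
  induction f with
  | zero => intro n ds; simp [Nat.toDigitsCore]
  | succ f ih =>
    intro n ds
    simp only [Nat.toDigitsCore]
    by_cases h : n / b = 0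
    · simp [h]
    · simp only [h, if_false]
      rw [ih (n / b) (Nat.digitChar (n % b) :: ds), ih (n / b) [Nat.digitChar (n % b)]]
      simp

def pvVal (ds : List Char) : Nat := ds.foldl (fun a c => a * 10 + (c.toNat - 48)) 0

theorem pv_digitChar (m : Nat) (h : m < 10) : (Nat.digitChar m).toNat - 48 = m := by
  interval_cases m <;> decide

theorem pv_val_toDigitsCore : ∀ (f n : Nat), n < 10 ^ f →
    pvVal (Nat.toDigitsCore 10 f n []) = n := by
  intro f
  induction f with
  | zero => intro n h; interval_cases n; simp [Nat.toDigitsCore, pvVal]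
  | succ f ih =>
    intro n h
    simp only [Nat.toDigitsCore]
    by_cases h0 : n / 10 = 0
    · simp only [h0, if_true]
      have h10 : n < 10 := by omega
      simp [pvVal, pv_digitChar (n % 10) (by omega)]
      omega
    · simp only [h0, if_false]
      rw [pv_toDigitsCore_shift]
      have hlt : n / 10 < 10 ^ f := by
        rw [Nat.div_lt_iff_lt_mul (by norm_num)]
        calc n < 10 ^ (f + 1) := h
        _ = 10 ^ f * 10 := by ring
      have := ih (n / 10) hlt
      simp [pvVal, List.foldl_append] at this ⊢
      rw [this, pv_digitChar (n % 10) (by omega)]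
      omega

def pvName (k : Int) : String := "C" ++ PySem.Int.toStr k

theorem pvName_inj {k m : Int} (hk : 1 ≤ k) (hm : 1 ≤ m) (h : pvName k = pvName m) :
    k = m := by
  have h2 : ('C' :: PySem.Int.toChars k) = ('C' :: PySem.Int.toChars m) := by
    have := congrArg String.toList h
    simpa [pvName, String.toList_append, PySem.Int.toList_toStr] using this
  have h3 : PySem.Int.toChars k = PySem.Int.toChars m := by simpa using h2
  unfold PySem.Int.toChars at h3
  rw [if_neg (by omega), if_neg (by omega)] at h3
  have hk1 : Nat.toDigits 10 k.toNat = Nat.toDigits 10 m.toNat := h3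
  have hv := congrArg pvVal hk1
  unfold Nat.toDigits at hv
  rw [pv_val_toDigitsCore _ _ (by
        calc k.toNat < 10 ^ k.toNat := Nat.lt_pow_self (by norm_num)
        _ ≤ 10 ^ (k.toNat + 1) := Nat.pow_le_pow_right (by norm_num) (by omega)),
      pv_val_toDigitsCore _ _ (by
        calc m.toNat < 10 ^ m.toNat := Nat.lt_pow_self (by norm_num)
        _ ≤ 10 ^ (m.toNat + 1) := Nat.pow_le_pow_right (by norm_num) (by omega))] at hv
  omega

theorem pvName_ne_empty (k : Int) : pvName k ≠ "" := by
  intro h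
  have := congrArg String.toList h
  simp [pvName, String.toList_append] at this


theorem pv_get?_split {d : PySem.Dict String (List Int)} {c : String} {l : List Int}
    (h : d.get? c = some l) :
    ∃ u v, d.items = u ++ (c, l) :: v ∧ (∀ p ∈ u, p.1 ≠ c) := by
  unfold PySem.Dict.get? at h
  rw [Option.map_eq_some_iff] at h
  obtain ⟨p, hf, hp2⟩ := h
  rw [List.find?_eq_some_iff_append] at hf
  obtain ⟨hpc, u, v, hitems, hu⟩ := hf
  have hp1 : p.1 = c := by simpa using hpc
  refine ⟨u, v, ?_, ?_⟩
  · rw [hitems]; congr 1; rw [← hp1, ← hp2]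
  · intro q hq
    have := hu q hq
    simpa using this

theorem pv_items_insert_fresh {d : PySem.Dict String (List Int)} {c : String}
    (h : d.contains c = false) (l : List Int) :
    (d.insert c l).items = d.items ++ [(c, l)] := by
  unfold PySem.Dict.insert
  rw [h]
  simp

theorem pv_items_insert_existing {u v : List (String × List Int)} {c : String} {l : List Int}
    (hu : ∀ p ∈ u, p.1 ≠ c) (hv : ∀ p ∈ v, p.1 ≠ c) (l' : List Int) :
    ((PySem.Dict.mk (u ++ (c, l) :: v)).insert c l').items = u ++ (c, l') :: v := by
  unfold PySem.Dict.insert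
  have hc : (PySem.Dict.mk (u ++ (c, l) :: v)).contains c = true := by
    unfold PySem.Dict.contains
    simp [List.any_append]
  rw [hc]
  simp only [if_true, List.map_append, List.map_cons]
  have hmap : ∀ (w : List (String × List Int)), (∀ p ∈ w, p.1 ≠ c) →
      w.map (fun p => if (p.1 == c) = true then (c, l') else p) = w := by
    intro w hw
    calc w.map (fun p => if (p.1 == c) = true then (c, l') else p)
        = w.map id := List.map_congr_left (fun p hp => by simp [hw p hp])
      _ = w := List.map_id _
  rw [hmap u hu, hmap v hv]
  simp

theorem pv_items_erase {u v : List (String × List Int)} {c : String} {l : List Int}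
    (hu : ∀ p ∈ u, p.1 ≠ c) (hv : ∀ p ∈ v, p.1 ≠ c) :
    ((PySem.Dict.mk (u ++ (c, l) :: v)).erase c).items = u ++ v := by
  unfold PySem.Dict.erase
  simp only [List.filter_append, List.filter_cons]
  rw [List.filter_eq_self.2 (by intro p hp; simpa using hu p hp),
      List.filter_eq_self.2 (by intro p hp; simpa using hv p hp)]
  simp

theorem pv_bc_foldl_get? (l : List Int) (c : String) :
    ∀ (bc : PySem.Dict Int String) (bx : Int),
    (l.foldl (fun bc x => bc.insert x c) bc).get? bx =
      if bx ∈ l then some c else bc.get? bx := by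
  induction l with
  | nil => intro bc bx; simp
  | cons x xs ih =>
    intro bc bx
    simp only [List.foldl_cons, ih]
    by_cases hmem : bx ∈ xs
    · simp [hmem]
    · by_cases hx : bx = x
      · subst hx
        simp [hmem, PySem.Dict.get?_insert_self]
      · simp [hmem, hx, PySem.Dict.get?_insert_of_ne _ _ hx]

def pvDisj (l1 l2 : List Int) : Prop := ∀ x, x ∈ l1 → x ∉ l2

theorem pv_findIdx?_of_mem {comps : List (List Int)} {i : Nat} {l : List Int} {a : Int}
    (hd : comps.Pairwise pvDisj) (hi : comps[i]? = some l) (ha : a ∈ l) :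
    comps.findIdx? (fun c => c.contains a) = some i := by
  induction comps generalizing i with
  | nil => simp at hi
  | cons x xs ih =>
    rw [List.pairwise_cons] at hd
    cases i with
    | zero =>
      simp at hi; subst hi
      rw [List.findIdx?_cons, if_pos (by simpa using ha)]
    | succ i =>
      simp only [List.getElem?_cons_succ] at hi
      have hl : l ∈ xs := List.mem_of_getElem? hi
      have hax : a ∉ x := by
        intro hax
        exact hd.1 l hl a hax ha
      rw [List.findIdx?_cons, if_neg (by simpa using hax), ih hd.2 hi]
      rfl

theorem pv_findIdx?_of_not_mem {comps : List (List Int)} {a : Int}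
    (h : ∀ l ∈ comps, a ∉ l) :
    comps.findIdx? (fun c => c.contains a) = none := by
  rw [List.findIdx?_eq_none_iff]
  intro l hl
  simpa using h l hl

-- ---- positional list helpers ----
theorem pv_set_mid {α : Type} (u v : List α) (x y : α) :
    (u ++ x :: v).set u.length y = u ++ y :: v := by
  rw [List.set_append]
  simp

theorem pv_erase_mid {α : Type} (u v : List α) (x : α) :
    (u ++ x :: v).eraseIdx u.length = u ++ v := by
  induction u with
  | nil => rfl
  | cons y ys ih => simpa using ih

theorem pv_getElem?_mid {α : Type} (u v : List α) (x : α) :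
    (u ++ x :: v)[u.length]? = some x := by
  rw [List.getElem?_append_right (Nat.le_refl _)]
  simp

theorem pv_getD_mid (u v : List (List Int)) (x : List Int) :
    (u ++ x :: v).getD u.length [] = x := by
  rw [List.getD_eq_getElem?_getD, pv_getElem?_mid]
  rfl

-- ---- dict lookup over a decomposition ----
theorem pv_get?_mk_append (u v : List (String × List Int)) (c : String) :
    (PySem.Dict.mk (u ++ v)).get? c =
      ((PySem.Dict.mk u).get? c).or ((PySem.Dict.mk v).get? c) := by
  unfold PySem.Dict.get?
  rw [List.find?_append]
  cases List.find? (fun p => p.1 == c) u <;> simp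

theorem pv_get?_mk_cons' (p : String × List Int) (v : List (String × List Int)) (c : String) :
    (PySem.Dict.mk (p :: v)).get? c =
      if p.1 = c then some p.2 else (PySem.Dict.mk v).get? c := by
  unfold PySem.Dict.get?
  rw [List.find?_cons]
  cases hpc : (p.1 == c) with
  | true => simp [(by simpa using hpc : p.1 = c)]
  | false => simp [(by simpa using hpc : ¬ p.1 = c)]

-- ---- the simulation invariant ----
structure pvInv (circuits : PySem.Dict String (List Int)) (bc : PySem.Dict Int String)
    (cc : Int) (comps : List (List Int)) : Prop where
  values_eq : circuits.values = comps
  nodupk : circuits.keys.Nodup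
  disj : comps.Pairwise pvDisj
  names : ∀ c ∈ circuits.keys, ∃ k : Int, 1 ≤ k ∧ k < cc ∧ c = pvName k
  cc1 : 1 ≤ cc
  bc_some : ∀ bx c, bc.get? bx = some c → ∃ l, circuits.get? c = some l ∧ bx ∈ l
  bc_none : ∀ bx, bc.get? bx = none → ∀ l ∈ comps, bx ∉ l

theorem pv_mem_keys_of_get? {d : PySem.Dict String (List Int)} {c : String} {l : List Int}
    (h : d.get? c = some l) : c ∈ d.keys := by
  obtain ⟨u, v, hitems, -⟩ := pv_get?_split h
  unfold PySem.Dict.keys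
  rw [hitems]
  simp

theorem pv_not_mem_keys {d : PySem.Dict String (List Int)} {c : String}
    (h : d.contains c = false) : c ∉ d.keys := by
  intro hmem
  rw [← PySem.Dict.contains_iff_mem_keys, h] at hmem
  exact Bool.false_ne_true hmem

theorem pv_values_insert_fresh {d : PySem.Dict String (List Int)} {c : String}
    (h : d.contains c = false) (l : List Int) :
    (d.insert c l).values = d.values ++ [l] := by
  unfold PySem.Dict.values
  rw [pv_items_insert_fresh h]
  simp

theorem pv_keys_insert_fresh {d : PySem.Dict String (List Int)} {c : String}
    (h : d.contains c = false) (l : List Int) :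
    (d.insert c l).keys = d.keys ++ [c] := by
  unfold PySem.Dict.keys
  rw [pv_items_insert_fresh h]
  simp

-- the next circuit name is always fresh
theorem pv_fresh {circuits : PySem.Dict String (List Int)} {cc : Int}
    (hnames : ∀ c ∈ circuits.keys, ∃ k : Int, 1 ≤ k ∧ k < cc ∧ c = pvName k)
    (hcc1 : 1 ≤ cc) : circuits.contains (pvName cc) = false := by
  cases hg : circuits.contains (pvName cc) with
  | false => rfl
  | true =>
    exfalso
    rw [PySem.Dict.contains_iff_mem_keys] at hg
    obtain ⟨k, hk1, hkcc, heq⟩ := hnames (pvName cc) hg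
    exact absurd (pvName_inj hk1 hcc1 heq.symm) (by omega)

theorem pv_get?_mk_none {u : List (String × List Int)} {c : String}
    (hu : ∀ p ∈ u, p.1 ≠ c) : (PySem.Dict.mk u).get? c = none := by
  unfold PySem.Dict.get?
  rw [List.find?_eq_none.2 (by intro p hp; simpa using hu p hp)]
  rfl

theorem pv_get?_mk_mid {u v : List (String × List Int)} {c : String} (x : List Int)
    (hu : ∀ p ∈ u, p.1 ≠ c) :
    (PySem.Dict.mk (u ++ (c, x) :: v)).get? c = some x := by
  rw [pv_get?_mk_append, pv_get?_mk_none hu, pv_get?_mk_cons']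
  simp

theorem pv_get?_change_mid {u v : List (String × List Int)} {c c0 : String}
    (hne : c ≠ c0) (x y : List Int) :
    (PySem.Dict.mk (u ++ (c0, x) :: v)).get? c =
      (PySem.Dict.mk (u ++ (c0, y) :: v)).get? c := by
  rw [pv_get?_mk_append, pv_get?_mk_append, pv_get?_mk_cons', pv_get?_mk_cons',
    if_neg (by simpa using fun h => hne h.symm), if_neg (by simpa using fun h => hne h.symm)]

theorem pv_pairwise_grow {U V : List (List Int)} {l : List Int} {x : Int}
    (hp : List.Pairwise pvDisj (U ++ l :: V))
    (hx : ∀ s ∈ U ++ l :: V, x ∉ s) :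
    List.Pairwise pvDisj (U ++ (l ++ [x]) :: V) := by
  rw [List.pairwise_append, List.pairwise_cons] at hp ⊢
  obtain ⟨hU, ⟨hlV, hV⟩, hcross⟩ := hp
  refine ⟨hU, ⟨?_, hV⟩, ?_⟩
  · intro s hs z hz
    rcases List.mem_append.1 hz with h1 | h1
    · exact hlV s hs z h1
    · simp only [List.mem_singleton] at h1
      subst h1
      exact fun hzs => hx s (by simp [hs]) hzs
  · intro s hs t ht z hzs
    rcases List.mem_cons.1 ht with h1 | h1
    · subst h1
      intro hzt
      rcases List.mem_append.1 hzt with h2 | h2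
      · exact hcross s hs l (by simp) z hzs h2
      · simp only [List.mem_singleton] at h2
        subst h2
        exact hx s (by simp [hs]) hzs
    · exact hcross s hs t (by simp [h1]) z hzs

theorem pv_inv_one {circuits : PySem.Dict String (List Int)} {bc : PySem.Dict Int String}
    {cc : Int} {comps : List (List Int)}
    {u v : List (String × List Int)} {cy : String} {l : List Int} {x : Int}
    (hve : circuits.values = comps) (hnk : circuits.keys.Nodup)
    (hdj : List.Pairwise pvDisj comps)
    (hnames : ∀ c ∈ circuits.keys, ∃ k : Int, 1 ≤ k ∧ k < cc ∧ c = pvName k)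
    (hcc1 : 1 ≤ cc)
    (hbs : ∀ bx c, bc.get? bx = some c → ∃ s, circuits.get? c = some s ∧ bx ∈ s)
    (hbn : ∀ bx, bc.get? bx = none → ∀ s ∈ comps, bx ∉ s)
    (hitems : circuits.items = u ++ (cy, l) :: v)
    (hu : ∀ p ∈ u, p.1 ≠ cy)
    (hgx : bc.get? x = none) :
    pvInv (circuits.insert cy (l ++ [x])) (bc.insert x cy) cc
      ((u.map Prod.snd) ++ (l ++ [x]) :: (v.map Prod.snd)) := by
  have hcirc : circuits = PySem.Dict.mk (u ++ (cy, l) :: v) := PySem.Dict.ext hitems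
  have hkeys : circuits.keys = (u.map Prod.fst) ++ cy :: (v.map Prod.fst) := by
    unfold PySem.Dict.keys
    rw [hitems]
    simp
  have hv : ∀ p ∈ v, p.1 ≠ cy := by
    intro p hp heq
    rw [hkeys] at hnk
    rcases List.nodup_append.1 hnk with ⟨-, h2, -⟩
    exact (List.nodup_cons.1 h2).1 (heq ▸ (List.mem_map_of_mem hp))
  have hcompsd : comps = (u.map Prod.snd) ++ l :: (v.map Prod.snd) := by
    rw [← hve]
    unfold PySem.Dict.values
    rw [hitems]
    simp
  have hitems' : (circuits.insert cy (l ++ [x])).items = u ++ (cy, l ++ [x]) :: v := by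
    rw [hcirc]
    exact pv_items_insert_existing hu hv _
  have hkeys' : (circuits.insert cy (l ++ [x])).keys = circuits.keys := by
    unfold PySem.Dict.keys
    rw [hitems', hitems]
    simp
  have hxfresh : ∀ s ∈ comps, x ∉ s := hbn x hgx
  have hgy : circuits.get? cy = some l := by
    rw [hcirc]
    exact pv_get?_mk_mid l hu
  constructor
  · unfold PySem.Dict.values
    rw [hitems']
    simp
  · rw [hkeys']
    exact hnk
  · rw [hcompsd] at hdj
    refine pv_pairwise_grow hdj ?_
    rw [← hcompsd]
    exact hxfresh
  · rw [hkeys']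
    exact hnames
  · exact hcc1
  · intro bx c hc
    by_cases hxa : bx = x
    · rw [hxa, PySem.Dict.get?_insert_self] at hc
      cases Option.some.inj hc
      exact ⟨l ++ [x], by rw [PySem.Dict.ext hitems']; exact pv_get?_mk_mid _ hu,
        by rw [hxa]; simp⟩
    · rw [PySem.Dict.get?_insert_of_ne _ _ hxa] at hc
      obtain ⟨s, hgs, hbxs⟩ := hbs bx c hc
      by_cases hcy : c = cy
      · subst hcy
        rw [hgy] at hgs
        have hsl : s = l := (Option.some.inj hgs).symm
        exact ⟨l ++ [x], by rw [PySem.Dict.ext hitems']; exact pv_get?_mk_mid _ hu,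
          List.mem_append_left _ (hsl ▸ hbxs)⟩
      · refine ⟨s, ?_, hbxs⟩
        rw [PySem.Dict.ext hitems', pv_get?_change_mid hcy _ l, ← hcirc]
        exact hgs
  · intro bx hc s hs
    by_cases hxa : bx = x
    · rw [hxa, PySem.Dict.get?_insert_self] at hc
      cases hc
    rw [PySem.Dict.get?_insert_of_ne _ _ hxa] at hc
    have hold := hbn bx hc
    rcases List.mem_append.1 hs with h1 | h1
    · exact hold s (by rw [hcompsd]; simp [h1])
    · rcases List.mem_cons.1 h1 with h2 | h2
      · subst h2
        intro hbxl
        rcases List.mem_append.1 hbxl with h3 | h3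
        · exact hold l (by rw [hcompsd]; simp) h3
        · simp only [List.mem_singleton] at h3
          exact hxa h3
      · exact hold s (by rw [hcompsd]; simp [h2])

theorem pv_get?_skip_mid {U V : List (String × List Int)} {c c0 : String}
    (hne : c ≠ c0) (x : List Int) :
    (PySem.Dict.mk (U ++ (c0, x) :: V)).get? c = (PySem.Dict.mk (U ++ V)).get? c := by
  rw [pv_get?_mk_append, pv_get?_mk_append, pv_get?_mk_cons',
    if_neg (by simpa using fun h => hne h.symm)]

theorem pv_disj_symm : Symmetric pvDisj := by
  intro s t hst z hzt hzs
  exact hst z hzs hzt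

theorem pv_keys_facts {P Q W : List (String × List Int)} {cL cR : String}
    (h : (P.map Prod.fst ++ cL :: (Q.map Prod.fst ++ cR :: W.map Prod.fst)).Nodup) :
    (∀ p ∈ P, p.1 ≠ cL) ∧ (∀ p ∈ P, p.1 ≠ cR) ∧ (∀ p ∈ Q, p.1 ≠ cL) ∧ (∀ p ∈ Q, p.1 ≠ cR)
      ∧ (∀ p ∈ W, p.1 ≠ cL) ∧ (∀ p ∈ W, p.1 ≠ cR) ∧ cL ≠ cR := by
  rw [List.nodup_middle, List.nodup_cons] at h
  obtain ⟨hL, h2⟩ := h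
  have hassoc : P.map Prod.fst ++ (Q.map Prod.fst ++ cR :: W.map Prod.fst)
      = (P.map Prod.fst ++ Q.map Prod.fst) ++ cR :: W.map Prod.fst :=
    (List.append_assoc _ _ _).symm
  rw [hassoc, List.nodup_middle, List.nodup_cons] at h2
  obtain ⟨hR, -⟩ := h2
  refine ⟨?_, ?_, ?_, ?_, ?_, ?_, ?_⟩
  · exact fun p hp heq => hL (List.mem_append_left _ (heq ▸ List.mem_map_of_mem hp))
  · exact fun p hp heq =>
      hR (List.mem_append_left _ (List.mem_append_left _ (heq ▸ List.mem_map_of_mem hp)))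
  · exact fun p hp heq =>
      hL (List.mem_append_right _ (List.mem_append_left _ (heq ▸ List.mem_map_of_mem hp)))
  · exact fun p hp heq =>
      hR (List.mem_append_left _ (List.mem_append_right _ (heq ▸ List.mem_map_of_mem hp)))
  · exact fun p hp heq =>
      hL (List.mem_append_right _
        (List.mem_append_right _ (List.mem_cons_of_mem _ (heq ▸ List.mem_map_of_mem hp))))
  · exact fun p hp heq => hR (List.mem_append_right _ (heq ▸ List.mem_map_of_mem hp))
  · intro heq
    exact hL (List.mem_append_right _ (List.mem_append_right _
      (by rw [heq]; exact List.mem_cons_self ..)))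

theorem pv_inv_mergeL {circuits : PySem.Dict String (List Int)} {bc : PySem.Dict Int String}
    {cc : Int} {comps : List (List Int)}
    {P Q W : List (String × List Int)} {cL cR : String} {lL lR : List Int}
    (hve : circuits.values = comps) (hnk : circuits.keys.Nodup)
    (hdj : List.Pairwise pvDisj comps)
    (hnames : ∀ c ∈ circuits.keys, ∃ k : Int, 1 ≤ k ∧ k < cc ∧ c = pvName k)
    (hcc1 : 1 ≤ cc)
    (hbs : ∀ bx c, bc.get? bx = some c → ∃ s, circuits.get? c = some s ∧ bx ∈ s)
    (hbn : ∀ bx, bc.get? bx = none → ∀ s ∈ comps, bx ∉ s)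
    (hitems : circuits.items = P ++ (cL, lL) :: (Q ++ (cR, lR) :: W)) :
    pvInv ((circuits.insert cL (lL ++ lR)).erase cR)
      (lR.foldl (fun d bx => d.insert bx cL) bc) cc
      ((P.map Prod.snd) ++ (lL ++ lR) :: ((Q.map Prod.snd) ++ (W.map Prod.snd))) := by
  have hcirc : circuits = PySem.Dict.mk (P ++ (cL, lL) :: (Q ++ (cR, lR) :: W)) :=
    PySem.Dict.ext hitems
  have hkeysd : circuits.keys =
      P.map Prod.fst ++ cL :: (Q.map Prod.fst ++ cR :: W.map Prod.fst) := by
    unfold PySem.Dict.keys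
    rw [hitems]
    simp
  have hkf := pv_keys_facts (hkeysd ▸ hnk)
  obtain ⟨hPL, hPR, hQL, hQR, hWL, hWR, hLR⟩ := hkf
  have hcompsd : comps =
      (P.map Prod.snd) ++ lL :: ((Q.map Prod.snd) ++ lR :: (W.map Prod.snd)) := by
    rw [← hve]
    unfold PySem.Dict.values
    rw [hitems]
    simp
  -- pairwise facts via a permutation to the front
  have hpermC : comps.Perm
      (lL :: lR :: ((P.map Prod.snd) ++ ((Q.map Prod.snd) ++ (W.map Prod.snd)))) := by
    rw [hcompsd]
    refine List.Perm.trans List.perm_middle ?_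
    refine List.Perm.cons lL ?_
    rw [show (P.map Prod.snd) ++ ((Q.map Prod.snd) ++ lR :: (W.map Prod.snd))
        = ((P.map Prod.snd) ++ (Q.map Prod.snd)) ++ lR :: (W.map Prod.snd) from by
      rw [List.append_assoc]]
    refine List.Perm.trans List.perm_middle ?_
    rw [List.append_assoc]
  have hpwf := (hpermC.pairwise_iff (fun h => pv_disj_symm h)).1 hdj
  rw [List.pairwise_cons] at hpwf
  obtain ⟨hLall, hpwf2⟩ := hpwf
  rw [List.pairwise_cons] at hpwf2
  obtain ⟨hRall, hrest⟩ := hpwf2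
  have hLrest : ∀ s ∈ (P.map Prod.snd) ++ ((Q.map Prod.snd) ++ (W.map Prod.snd)),
      pvDisj lL s := fun s hs => hLall s (by simp [hs])
  -- items after the two dict operations
  have hitems1 : (circuits.insert cL (lL ++ lR)).items =
      P ++ (cL, lL ++ lR) :: (Q ++ (cR, lR) :: W) := by
    rw [hcirc]
    exact pv_items_insert_existing hPL
      (by
        intro p hp
        rcases List.mem_append.1 hp with h1 | h1
        · exact hQL p h1
        · rcases List.mem_cons.1 h1 with h2 | h2
          · subst h2; exact fun hh => hLR hh.symm
          · exact hWL p h2) _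
  have hitems2 : ((circuits.insert cL (lL ++ lR)).erase cR).items =
      (P ++ (cL, lL ++ lR) :: Q) ++ W := by
    rw [show (circuits.insert cL (lL ++ lR)) =
        PySem.Dict.mk ((P ++ (cL, lL ++ lR) :: Q) ++ (cR, lR) :: W) from
      PySem.Dict.ext (by rw [hitems1]; simp)]
    exact pv_items_erase
      (by
        intro p hp
        rcases List.mem_append.1 hp with h1 | h1
        · exact hPR p h1
        · rcases List.mem_cons.1 h1 with h2 | h2
          · subst h2; exact hLR
          · exact hQR p h2)
      hWR
  have hitems2' : ((circuits.insert cL (lL ++ lR)).erase cR).items =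
      P ++ (cL, lL ++ lR) :: (Q ++ W) := by
    rw [hitems2, List.append_assoc]
    rfl
  have hg2L : ((circuits.insert cL (lL ++ lR)).erase cR).get? cL = some (lL ++ lR) := by
    rw [PySem.Dict.ext hitems2']
    exact pv_get?_mk_mid _ hPL
  have hg2other : ∀ c, c ≠ cL → c ≠ cR →
      ((circuits.insert cL (lL ++ lR)).erase cR).get? c = circuits.get? c := by
    intro c hcL hcR
    rw [PySem.Dict.ext hitems2', pv_get?_change_mid hcL _ lL]
    have := pv_get?_skip_mid (U := P ++ (cL, lL) :: Q) (V := W) hcR lR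
    rw [show P ++ (cL, lL) :: (Q ++ W) = (P ++ (cL, lL) :: Q) ++ W from by
        rw [List.append_assoc]; rfl, ← this, hcirc]
    rw [show (P ++ (cL, lL) :: Q) ++ (cR, lR) :: W = P ++ (cL, lL) :: (Q ++ (cR, lR) :: W)
      from by rw [List.append_assoc]; rfl]
  have hgL : circuits.get? cL = some lL := by
    rw [hcirc]
    exact pv_get?_mk_mid _ hPL
  have hgR : circuits.get? cR = some lR := by
    rw [show circuits = PySem.Dict.mk ((P ++ (cL, lL) :: Q) ++ (cR, lR) :: W) from
      PySem.Dict.ext (by rw [hitems]; rw [List.append_assoc]; rfl)]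
    refine pv_get?_mk_mid _ ?_
    intro p hp
    rcases List.mem_append.1 hp with h1 | h1
    · exact hPR p h1
    · rcases List.mem_cons.1 h1 with h2 | h2
      · subst h2; exact hLR
      · exact hQR p h2
  constructor
  · unfold PySem.Dict.values
    rw [hitems2']
    simp
  · have : ((circuits.insert cL (lL ++ lR)).erase cR).keys =
        P.map Prod.fst ++ cL :: (Q.map Prod.fst ++ W.map Prod.fst) := by
      unfold PySem.Dict.keys
      rw [hitems2']
      simp
    rw [this]
    refine List.Nodup.sublist ?_ (hkeysd ▸ hnk)
    refine List.Sublist.append_left ?_ _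
    refine List.Sublist.cons₂ _ ?_
    exact List.Sublist.append_left (List.sublist_cons_self _ _) _
  · -- pairwise disjointness
    have hpermN : ((P.map Prod.snd) ++ (lL ++ lR) :: ((Q.map Prod.snd) ++ (W.map Prod.snd))).Perm
        ((lL ++ lR) :: ((P.map Prod.snd) ++ ((Q.map Prod.snd) ++ (W.map Prod.snd)))) :=
      List.perm_middle
    refine (hpermN.pairwise_iff (fun h => pv_disj_symm h)).2 ?_
    rw [List.pairwise_cons]
    refine ⟨?_, hrest⟩
    intro s hs z hz
    rcases List.mem_append.1 hz with h1 | h1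
    · exact hLrest s hs z h1
    · exact hRall s hs z h1
  · intro c hc
    refine hnames c ?_
    revert hc
    have : ((circuits.insert cL (lL ++ lR)).erase cR).keys =
        P.map Prod.fst ++ cL :: (Q.map Prod.fst ++ W.map Prod.fst) := by
      unfold PySem.Dict.keys
      rw [hitems2']
      simp
    rw [this, hkeysd]
    intro hc
    rcases List.mem_append.1 hc with h1 | h1
    · exact List.mem_append_left _ h1
    · rcases List.mem_cons.1 h1 with h2 | h2
      · exact List.mem_append_right _ (h2 ▸ List.mem_cons_self ..)
      · rcases List.mem_append.1 h2 with h3 | h3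
        · exact List.mem_append_right _ (List.mem_cons_of_mem _ (List.mem_append_left _ h3))
        · exact List.mem_append_right _
            (List.mem_cons_of_mem _ (List.mem_append_right _ (List.mem_cons_of_mem _ h3)))
  · exact hcc1
  · intro bx c hc
    rw [pv_bc_foldl_get?] at hc
    by_cases hbxR : bx ∈ lR
    · rw [if_pos hbxR] at hc
      cases Option.some.inj hc
      exact ⟨lL ++ lR, hg2L, List.mem_append_right _ hbxR⟩
    · rw [if_neg hbxR] at hc
      obtain ⟨s, hgs, hbxs⟩ := hbs bx c hc
      by_cases hcL2 : c = cL
      · subst hcL2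
        rw [hgL] at hgs
        have hsl : s = lL := (Option.some.inj hgs).symm
        exact ⟨lL ++ lR, hg2L, List.mem_append_left _ (hsl ▸ hbxs)⟩
      · by_cases hcR2 : c = cR
        · subst hcR2
          rw [hgR] at hgs
          have hsl : s = lR := (Option.some.inj hgs).symm
          exact absurd (hsl ▸ hbxs) hbxR
        · exact ⟨s, by rw [hg2other c hcL2 hcR2]; exact hgs, hbxs⟩
  · intro bx hc s hs
    rw [pv_bc_foldl_get?] at hc
    by_cases hbxR : bx ∈ lR
    · rw [if_pos hbxR] at hc; cases hc
    rw [if_neg hbxR] at hc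
    have hold := hbn bx hc
    rcases List.mem_append.1 hs with h1 | h1
    · exact hold s (by rw [hcompsd]; simp [h1])
    · rcases List.mem_cons.1 h1 with h2 | h2
      · subst h2
        intro hbx
        rcases List.mem_append.1 hbx with h3 | h3
        · exact hold lL (by rw [hcompsd]; simp) h3
        · exact hbxR h3
      · rcases List.mem_append.1 h2 with h3 | h3
        · exact hold s (by rw [hcompsd]; simp [h3])
        · exact hold s (by rw [hcompsd]; simp [h3])

theorem pv_inv_mergeR {circuits : PySem.Dict String (List Int)} {bc : PySem.Dict Int String}
    {cc : Int} {comps : List (List Int)}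
    {P Q W : List (String × List Int)} {cL cR : String} {lL lR : List Int}
    (hve : circuits.values = comps) (hnk : circuits.keys.Nodup)
    (hdj : List.Pairwise pvDisj comps)
    (hnames : ∀ c ∈ circuits.keys, ∃ k : Int, 1 ≤ k ∧ k < cc ∧ c = pvName k)
    (hcc1 : 1 ≤ cc)
    (hbs : ∀ bx c, bc.get? bx = some c → ∃ s, circuits.get? c = some s ∧ bx ∈ s)
    (hbn : ∀ bx, bc.get? bx = none → ∀ s ∈ comps, bx ∉ s)
    (hitems : circuits.items = P ++ (cL, lL) :: (Q ++ (cR, lR) :: W)) :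
    pvInv ((circuits.insert cR (lR ++ lL)).erase cL)
      (lL.foldl (fun d bx => d.insert bx cR) bc) cc
      ((P.map Prod.snd) ++ ((Q.map Prod.snd) ++ (lR ++ lL) :: (W.map Prod.snd))) := by
  have hcirc : circuits = PySem.Dict.mk (P ++ (cL, lL) :: (Q ++ (cR, lR) :: W)) :=
    PySem.Dict.ext hitems
  have hkeysd : circuits.keys =
      P.map Prod.fst ++ cL :: (Q.map Prod.fst ++ cR :: W.map Prod.fst) := by
    unfold PySem.Dict.keys
    rw [hitems]
    simp
  have hkf := pv_keys_facts (hkeysd ▸ hnk)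
  obtain ⟨hPL, hPR, hQL, hQR, hWL, hWR, hLR⟩ := hkf
  have hPQR : ∀ p ∈ P ++ (cL, lL) :: Q, p.1 ≠ cR := by
    intro p hp
    rcases List.mem_append.1 hp with h1 | h1
    · exact hPR p h1
    · rcases List.mem_cons.1 h1 with h2 | h2
      · subst h2; exact hLR
      · exact hQR p h2
  have hcompsd : comps =
      (P.map Prod.snd) ++ lL :: ((Q.map Prod.snd) ++ lR :: (W.map Prod.snd)) := by
    rw [← hve]
    unfold PySem.Dict.values
    rw [hitems]
    simp
  have hpermC : comps.Perm
      (lL :: lR :: ((P.map Prod.snd) ++ ((Q.map Prod.snd) ++ (W.map Prod.snd)))) := by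
    rw [hcompsd]
    refine List.Perm.trans List.perm_middle ?_
    refine List.Perm.cons lL ?_
    rw [show (P.map Prod.snd) ++ ((Q.map Prod.snd) ++ lR :: (W.map Prod.snd))
        = ((P.map Prod.snd) ++ (Q.map Prod.snd)) ++ lR :: (W.map Prod.snd) from by
      rw [List.append_assoc]]
    refine List.Perm.trans List.perm_middle ?_
    rw [List.append_assoc]
  have hpwf := (hpermC.pairwise_iff (fun h => pv_disj_symm h)).1 hdj
  rw [List.pairwise_cons] at hpwf
  obtain ⟨hLall, hpwf2⟩ := hpwf
  rw [List.pairwise_cons] at hpwf2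
  obtain ⟨hRall, hrest⟩ := hpwf2
  have hLrest : ∀ s ∈ (P.map Prod.snd) ++ ((Q.map Prod.snd) ++ (W.map Prod.snd)),
      pvDisj lL s := fun s hs => hLall s (by simp [hs])
  -- items after the two dict operations
  have hitems1 : (circuits.insert cR (lR ++ lL)).items =
      (P ++ (cL, lL) :: Q) ++ (cR, lR ++ lL) :: W := by
    rw [show circuits = PySem.Dict.mk ((P ++ (cL, lL) :: Q) ++ (cR, lR) :: W) from
      PySem.Dict.ext (by rw [hitems, List.append_assoc]; rfl)]
    exact pv_items_insert_existing hPQR hWR _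
  have hitems2 : ((circuits.insert cR (lR ++ lL)).erase cL).items =
      P ++ (Q ++ (cR, lR ++ lL) :: W) := by
    rw [show (circuits.insert cR (lR ++ lL)) =
        PySem.Dict.mk (P ++ (cL, lL) :: (Q ++ (cR, lR ++ lL) :: W)) from
      PySem.Dict.ext (by rw [hitems1, List.append_assoc]; rfl)]
    exact pv_items_erase hPL
      (by
        intro p hp
        rcases List.mem_append.1 hp with h1 | h1
        · exact hQL p h1
        · rcases List.mem_cons.1 h1 with h2 | h2
          · subst h2; exact fun hh => hLR hh.symm
          · exact hWL p h2)
  have hitems2' : ((circuits.insert cR (lR ++ lL)).erase cL).items =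
      (P ++ Q) ++ (cR, lR ++ lL) :: W := by
    rw [hitems2, List.append_assoc]
  have hPQonly : ∀ p ∈ P ++ Q, p.1 ≠ cR := by
    intro p hp
    rcases List.mem_append.1 hp with h1 | h1
    · exact hPR p h1
    · exact hQR p h1
  have hg2R : ((circuits.insert cR (lR ++ lL)).erase cL).get? cR = some (lR ++ lL) := by
    rw [PySem.Dict.ext hitems2']
    exact pv_get?_mk_mid _ hPQonly
  have hg2other : ∀ c, c ≠ cL → c ≠ cR →
      ((circuits.insert cR (lR ++ lL)).erase cL).get? c = circuits.get? c := by
    intro c hcL2 hcR2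
    rw [PySem.Dict.ext hitems2', pv_get?_change_mid hcR2 _ lR]
    have hskip := pv_get?_skip_mid (U := P) (V := Q ++ (cR, lR) :: W) hcL2 lL
    rw [show (P ++ Q) ++ (cR, lR) :: W = P ++ (Q ++ (cR, lR) :: W) from by
        rw [List.append_assoc], ← hskip, hcirc]
  have hgL : circuits.get? cL = some lL := by
    rw [hcirc]
    exact pv_get?_mk_mid _ hPL
  have hgR : circuits.get? cR = some lR := by
    rw [show circuits = PySem.Dict.mk ((P ++ (cL, lL) :: Q) ++ (cR, lR) :: W) from
      PySem.Dict.ext (by rw [hitems, List.append_assoc]; rfl)]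
    exact pv_get?_mk_mid _ hPQR
  constructor
  · unfold PySem.Dict.values
    rw [hitems2]
    simp
  · have : ((circuits.insert cR (lR ++ lL)).erase cL).keys =
        P.map Prod.fst ++ (Q.map Prod.fst ++ cR :: W.map Prod.fst) := by
      unfold PySem.Dict.keys
      rw [hitems2]
      simp
    rw [this]
    refine List.Nodup.sublist ?_ (hkeysd ▸ hnk)
    exact List.Sublist.append_left (List.sublist_cons_self _ _) _
  · -- pairwise disjointness
    have hpermN : ((P.map Prod.snd) ++ ((Q.map Prod.snd) ++ (lR ++ lL) :: (W.map Prod.snd))).Perm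
        ((lR ++ lL) :: ((P.map Prod.snd) ++ ((Q.map Prod.snd) ++ (W.map Prod.snd)))) := by
      rw [show (P.map Prod.snd) ++ ((Q.map Prod.snd) ++ (lR ++ lL) :: (W.map Prod.snd))
          = ((P.map Prod.snd) ++ (Q.map Prod.snd)) ++ (lR ++ lL) :: (W.map Prod.snd) from by
        rw [List.append_assoc]]
      refine List.Perm.trans List.perm_middle ?_
      rw [List.append_assoc]
    refine (hpermN.pairwise_iff (fun h => pv_disj_symm h)).2 ?_
    rw [List.pairwise_cons]
    refine ⟨?_, hrest⟩
    intro s hs z hz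
    rcases List.mem_append.1 hz with h1 | h1
    · exact hRall s hs z h1
    · exact hLrest s hs z h1
  · intro c hc
    refine hnames c ?_
    revert hc
    have : ((circuits.insert cR (lR ++ lL)).erase cL).keys =
        P.map Prod.fst ++ (Q.map Prod.fst ++ cR :: W.map Prod.fst) := by
      unfold PySem.Dict.keys
      rw [hitems2]
      simp
    rw [this, hkeysd]
    intro hc
    rcases List.mem_append.1 hc with h1 | h1
    · exact List.mem_append_left _ h1
    · exact List.mem_append_right _ (List.mem_cons_of_mem _ h1)
  · exact hcc1
  · intro bx c hc
    rw [pv_bc_foldl_get?] at hc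
    by_cases hbxL : bx ∈ lL
    · rw [if_pos hbxL] at hc
      cases Option.some.inj hc
      exact ⟨lR ++ lL, hg2R, List.mem_append_right _ hbxL⟩
    · rw [if_neg hbxL] at hc
      obtain ⟨s, hgs, hbxs⟩ := hbs bx c hc
      by_cases hcR2 : c = cR
      · subst hcR2
        rw [hgR] at hgs
        have hsl : s = lR := (Option.some.inj hgs).symm
        exact ⟨lR ++ lL, hg2R, List.mem_append_left _ (hsl ▸ hbxs)⟩
      · by_cases hcL2 : c = cL
        · subst hcL2
          rw [hgL] at hgs
          have hsl : s = lL := (Option.some.inj hgs).symm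
          exact absurd (hsl ▸ hbxs) hbxL
        · exact ⟨s, by rw [hg2other c hcL2 hcR2]; exact hgs, hbxs⟩
  · intro bx hc s hs
    rw [pv_bc_foldl_get?] at hc
    by_cases hbxL : bx ∈ lL
    · rw [if_pos hbxL] at hc; cases hc
    rw [if_neg hbxL] at hc
    have hold := hbn bx hc
    rcases List.mem_append.1 hs with h1 | h1
    · exact hold s (by rw [hcompsd]; simp [h1])
    · rcases List.mem_append.1 h1 with h2 | h2
      · exact hold s (by rw [hcompsd]; simp [h2])
      · rcases List.mem_cons.1 h2 with h3 | h3
        · subst h3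
          intro hbx
          rcases List.mem_append.1 hbx with h4 | h4
          · exact hold lR (by rw [hcompsd]; simp) h4
          · exact hbxL h4
        · exact hold s (by rw [hcompsd]; simp [h3])

theorem pv_mem_items_of_get?' {d : PySem.Dict String (List Int)} {c : String} {l : List Int}
    (h : d.get? c = some l) : (c, l) ∈ d.items := by
  obtain ⟨u, v, hitems, -⟩ := pv_get?_split h
  rw [hitems]
  simp

theorem pv_step_inv {circuits : PySem.Dict String (List Int)} {bc : PySem.Dict Int String}
    {cc : Int} {comps : List (List Int)} (a b : Int)
    (h : pvInv circuits bc cc comps) :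
    pvInv (pvJoinBoxes a b circuits bc cc).1 (pvJoinBoxes a b circuits bc cc).2.1
      (pvJoinBoxes a b circuits bc cc).2.2 (pvJoin comps a b) := by
  obtain ⟨hve, hnk, hdj, hnames, hcc1, hbs, hbn⟩ := h
  cases hga : bc.get? a with
  | none =>
    cases hgb : bc.get? b with
    | none =>
      -- CASE NN: both boxes new -> fresh circuit appended
      have hca : bc.contains a = false := by
        rw [PySem.Dict.contains_eq_isSome_get?, hga]; rfl
      have hcb : bc.contains b = false := by
        rw [PySem.Dict.contains_eq_isSome_get?, hgb]; rfl
      have hana : ∀ l ∈ comps, a ∉ l := hbn a hga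
      have hbnb : ∀ l ∈ comps, b ∉ l := hbn b hgb
      have hfresh := pv_fresh hnames hcc1
      have hA : pvJoinBoxes a b circuits bc cc =
          (circuits.insert (pvName cc) [a, b],
           (bc.insert a (pvName cc)).insert b (pvName cc), cc + 1) := by
        simp [pvJoinBoxes, hca, hcb, pvName]
      have hB : pvJoin comps a b = comps ++ [[a, b]] := by
        unfold pvJoin
        rw [pv_findIdx?_of_not_mem hana, pv_findIdx?_of_not_mem hbnb]
      rw [hA, hB]
      dsimp only
      constructor
      · rw [pv_values_insert_fresh hfresh, hve]
      · rw [pv_keys_insert_fresh hfresh]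
        exact List.Nodup.append hnk (List.nodup_singleton _)
          (by intro c hc1 hc2; simp at hc2; subst hc2; exact pv_not_mem_keys hfresh hc1)
      · rw [List.pairwise_append]
        refine ⟨hdj, List.pairwise_singleton _ _, ?_⟩
        intro l hl l' hl' x hxl
        simp only [List.mem_singleton] at hl'
        subst hl'
        intro hx
        simp only [List.mem_cons, List.mem_singleton, List.not_mem_nil, or_false] at hx
        rcases hx with h1 | h1
        · exact hana l hl (h1 ▸ hxl)
        · exact hbnb l hl (h1 ▸ hxl)
      · rw [pv_keys_insert_fresh hfresh]
        intro c hc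
        rcases List.mem_append.1 hc with h1 | h1
        · obtain ⟨k, hk1, hk2, hk3⟩ := hnames c h1
          exact ⟨k, hk1, by omega, hk3⟩
        · simp only [List.mem_singleton] at h1
          exact ⟨cc, hcc1, by omega, h1⟩
      · omega
      · intro bx c hc
        by_cases hxb : bx = b
        · rw [hxb, PySem.Dict.get?_insert_self] at hc
          cases Option.some.inj hc
          exact ⟨[a, b], PySem.Dict.get?_insert_self _ _ _, by rw [hxb]; simp⟩
        · rw [PySem.Dict.get?_insert_of_ne _ _ hxb] at hc
          by_cases hxa : bx = a
          · rw [hxa, PySem.Dict.get?_insert_self] at hc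
            cases Option.some.inj hc
            exact ⟨[a, b], PySem.Dict.get?_insert_self _ _ _, by rw [hxa]; simp⟩
          · rw [PySem.Dict.get?_insert_of_ne _ _ hxa] at hc
            obtain ⟨l, hgl, hbxl⟩ := hbs bx c hc
            refine ⟨l, ?_, hbxl⟩
            rw [PySem.Dict.get?_insert_of_ne]
            · exact hgl
            · intro hcn
              exact pv_not_mem_keys hfresh (hcn ▸ pv_mem_keys_of_get? hgl)
      · intro bx hc l hl
        by_cases hxb : bx = b
        · rw [hxb, PySem.Dict.get?_insert_self] at hc; cases hc
        by_cases hxa : bx = a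
        · rw [PySem.Dict.get?_insert_of_ne _ _ hxb, hxa, PySem.Dict.get?_insert_self] at hc
          cases hc
        rw [PySem.Dict.get?_insert_of_ne _ _ hxb, PySem.Dict.get?_insert_of_ne _ _ hxa] at hc
        rcases List.mem_append.1 hl with h1 | h1
        · exact hbn bx hc l h1
        · simp only [List.mem_singleton] at h1
          subst h1
          intro hx
          simp only [List.mem_cons, List.mem_singleton, List.not_mem_nil, or_false] at hx
          rcases hx with h2 | h2
          · exact hxa h2
          · exact hxb h2
    | some c2 =>
      -- CASE NS: a new, b already in circuit c2
      have hca : bc.contains a = false := by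
        rw [PySem.Dict.contains_eq_isSome_get?, hga]; rfl
      have hcb : bc.contains b = true := by
        rw [PySem.Dict.contains_eq_isSome_get?, hgb]; rfl
      have hgdb : bc.getD b "" = c2 := by unfold PySem.Dict.getD; rw [hgb]; rfl
      obtain ⟨l, hgl, hbl⟩ := hbs b c2 hgb
      have hc2ne : c2 ≠ "" := by
        obtain ⟨k, -, -, hk⟩ := hnames c2 (pv_mem_keys_of_get? hgl)
        rw [hk]; exact pvName_ne_empty k
      obtain ⟨u, v, hitems, hu⟩ := pv_get?_split hgl
      have hcompsd : comps = (u.map Prod.snd) ++ l :: (v.map Prod.snd) := by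
        rw [← hve]; unfold PySem.Dict.values; rw [hitems]; simp
      have hgdc2 : circuits.getD c2 [] = l := by unfold PySem.Dict.getD; rw [hgl]; rfl
      have hA : pvJoinBoxes a b circuits bc cc =
          (circuits.insert c2 (l ++ [a]), bc.insert a c2, cc) := by
        simp [pvJoinBoxes, hca, hcb, hgdb, hgdc2, hc2ne]
      have hfia := pv_findIdx?_of_not_mem (a := a) (hbn a hga)
      have hfib : comps.findIdx? (fun c => c.contains b) = some (u.map Prod.snd).length :=
        pv_findIdx?_of_mem hdj (by rw [hcompsd]; exact pv_getElem?_mid _ _ _) hbl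
      have hB : pvJoin comps a b = (u.map Prod.snd) ++ (l ++ [a]) :: (v.map Prod.snd) := by
        unfold pvJoin
        rw [hfia, hfib]
        dsimp only
        rw [hcompsd, pv_getD_mid, pv_set_mid]
      rw [hA, hB]
      dsimp only
      exact pv_inv_one hve hnk hdj hnames hcc1 hbs hbn hitems hu hga
  | some c1 =>
    cases hgb : bc.get? b with
    | none =>
      -- CASE SN: a already in circuit c1, b new
      have hca : bc.contains a = true := by
        rw [PySem.Dict.contains_eq_isSome_get?, hga]; rfl
      have hcb : bc.contains b = false := by
        rw [PySem.Dict.contains_eq_isSome_get?, hgb]; rfl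
      have hgda : bc.getD a "" = c1 := by unfold PySem.Dict.getD; rw [hga]; rfl
      obtain ⟨l, hgl, hal⟩ := hbs a c1 hga
      have hc1ne : c1 ≠ "" := by
        obtain ⟨k, -, -, hk⟩ := hnames c1 (pv_mem_keys_of_get? hgl)
        rw [hk]; exact pvName_ne_empty k
      obtain ⟨u, v, hitems, hu⟩ := pv_get?_split hgl
      have hcompsd : comps = (u.map Prod.snd) ++ l :: (v.map Prod.snd) := by
        rw [← hve]; unfold PySem.Dict.values; rw [hitems]; simp
      have hgdc1 : circuits.getD c1 [] = l := by unfold PySem.Dict.getD; rw [hgl]; rfl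
      have hA : pvJoinBoxes a b circuits bc cc =
          (circuits.insert c1 (l ++ [b]), bc.insert b c1, cc) := by
        simp [pvJoinBoxes, hca, hcb, hgda, hgdc1, hc1ne]
      have hfib := pv_findIdx?_of_not_mem (a := b) (hbn b hgb)
      have hfia : comps.findIdx? (fun c => c.contains a) = some (u.map Prod.snd).length :=
        pv_findIdx?_of_mem hdj (by rw [hcompsd]; exact pv_getElem?_mid _ _ _) hal
      have hB : pvJoin comps a b = (u.map Prod.snd) ++ (l ++ [b]) :: (v.map Prod.snd) := by
        unfold pvJoin
        rw [hfia, hfib]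
        dsimp only
        rw [hcompsd, pv_getD_mid, pv_set_mid]
      rw [hA, hB]
      dsimp only
      exact pv_inv_one hve hnk hdj hnames hcc1 hbs hbn hitems hu hgb
    | some c2 =>
      -- a is in circuit c1, b in circuit c2
      have hca : bc.contains a = true := by
        rw [PySem.Dict.contains_eq_isSome_get?, hga]; rfl
      have hcb : bc.contains b = true := by
        rw [PySem.Dict.contains_eq_isSome_get?, hgb]; rfl
      have hgda : bc.getD a "" = c1 := by unfold PySem.Dict.getD; rw [hga]; rfl
      have hgdb : bc.getD b "" = c2 := by unfold PySem.Dict.getD; rw [hgb]; rfl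
      obtain ⟨l1, hgl1, hal1⟩ := hbs a c1 hga
      obtain ⟨l2, hgl2, hbl2⟩ := hbs b c2 hgb
      have hc1ne : c1 ≠ "" := by
        obtain ⟨k, -, -, hk⟩ := hnames c1 (pv_mem_keys_of_get? hgl1)
        rw [hk]; exact pvName_ne_empty k
      by_cases hc12 : c1 = c2
      · -- CASE SAME: both endpoints in the same circuit, nothing happens
        subst hc12
        have hll : l1 = l2 := by
          rw [hgl1] at hgl2
          exact Option.some.inj hgl2
        subst hll
        obtain ⟨u, v, hitems, hu⟩ := pv_get?_split hgl1
        have hcompsd : comps = (u.map Prod.snd) ++ l1 :: (v.map Prod.snd) := by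
          rw [← hve]; unfold PySem.Dict.values; rw [hitems]; simp
        have hA : pvJoinBoxes a b circuits bc cc = (circuits, bc, cc) := by
          simp [pvJoinBoxes, hca, hcb, hgda, hgdb, hc1ne]
        have hfia : comps.findIdx? (fun c => c.contains a) = some (u.map Prod.snd).length :=
          pv_findIdx?_of_mem hdj (by rw [hcompsd]; exact pv_getElem?_mid _ _ _) hal1
        have hfib : comps.findIdx? (fun c => c.contains b) = some (u.map Prod.snd).length :=
          pv_findIdx?_of_mem hdj (by rw [hcompsd]; exact pv_getElem?_mid _ _ _) hbl2
        have hB : pvJoin comps a b = comps := by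
          unfold pvJoin
          rw [hfia, hfib]
          dsimp only
          rw [if_pos rfl]
        rw [hA, hB]
        dsimp only
        exact ⟨hve, hnk, hdj, hnames, hcc1, hbs, hbn⟩
      · -- CASE MERGE
        have hc2ne : c2 ≠ "" := by
          obtain ⟨k, -, -, hk⟩ := hnames c2 (pv_mem_keys_of_get? hgl2)
          rw [hk]; exact pvName_ne_empty k
        have hgdc1 : circuits.getD c1 [] = l1 := by
          unfold PySem.Dict.getD; rw [hgl1]; rfl
        have hgdc2 : circuits.getD c2 [] = l2 := by
          unfold PySem.Dict.getD; rw [hgl2]; rfl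
        obtain ⟨u, v, hitems0, hu⟩ := pv_get?_split hgl1
        have hmem2 : (c2, l2) ∈ circuits.items := pv_mem_items_of_get?' hgl2
        rw [hitems0] at hmem2
        rcases List.mem_append.1 hmem2 with hmu | hmv
        · -- c2 comes BEFORE c1 in the dict
          obtain ⟨q, w, hqw⟩ := List.append_of_mem hmu
          have hitems : circuits.items = q ++ (c2, l2) :: (w ++ (c1, l1) :: v) := by
            rw [hitems0, hqw, List.append_assoc]
            rfl
          have hcompsd : comps = (q.map Prod.snd) ++ l2 ::
              ((w.map Prod.snd) ++ l1 :: (v.map Prod.snd)) := by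
            rw [← hve]; unfold PySem.Dict.values; rw [hitems]; simp
          have hfib : comps.findIdx? (fun c => c.contains b) = some (q.map Prod.snd).length :=
            pv_findIdx?_of_mem hdj (by rw [hcompsd]; exact pv_getElem?_mid _ _ _) hbl2
          have hfia : comps.findIdx? (fun c => c.contains a)
              = some ((q.map Prod.snd) ++ l2 :: (w.map Prod.snd)).length :=
            pv_findIdx?_of_mem hdj (by
              rw [hcompsd, show (q.map Prod.snd) ++ l2 :: ((w.map Prod.snd) ++ l1 :: (v.map Prod.snd))
                  = ((q.map Prod.snd) ++ l2 :: (w.map Prod.snd)) ++ l1 :: (v.map Prod.snd) from by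
                simp]
              exact pv_getElem?_mid _ _ _) hal1
          have hij : ¬ ((q.map Prod.snd) ++ l2 :: (w.map Prod.snd)).length
              = (q.map Prod.snd).length := by
            simp only [List.length_append, List.length_cons]
            omega
          have hgdj : comps.getD (q.map Prod.snd).length [] = l2 := by
            rw [hcompsd]; exact pv_getD_mid _ _ _
          have hgdi : comps.getD ((q.map Prod.snd) ++ l2 :: (w.map Prod.snd)).length [] = l1 := by
            rw [hcompsd, show (q.map Prod.snd) ++ l2 :: ((w.map Prod.snd) ++ l1 :: (v.map Prod.snd))
                = ((q.map Prod.snd) ++ l2 :: (w.map Prod.snd)) ++ l1 :: (v.map Prod.snd) from by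
              simp]
            exact pv_getD_mid _ _ _
          by_cases hlen : l2.length < l1.length
          · -- keep c1 (the right one)
            have hA : pvJoinBoxes a b circuits bc cc =
                ((circuits.insert c1 (l1 ++ l2)).erase c2,
                 l2.foldl (fun d bx => d.insert bx c1) bc, cc) := by
              simp [pvJoinBoxes, hca, hcb, hgda, hgdb, hc1ne, hc2ne, hc12, hlen,
                (show ¬ l1.length ≤ l2.length by omega), hgdc1, hgdc2]
            have hB : pvJoin comps a b =
                (q.map Prod.snd) ++ ((w.map Prod.snd) ++ (l1 ++ l2) :: (v.map Prod.snd)) := by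
              unfold pvJoin
              rw [hfia, hfib]
              dsimp only
              rw [if_neg hij, hgdi, hgdj, if_pos hlen, hcompsd]
              rw [show (q.map Prod.snd) ++ l2 :: ((w.map Prod.snd) ++ l1 :: (v.map Prod.snd))
                  = ((q.map Prod.snd) ++ l2 :: (w.map Prod.snd)) ++ l1 :: (v.map Prod.snd) from by
                simp, pv_set_mid]
              rw [show ((q.map Prod.snd) ++ l2 :: (w.map Prod.snd)) ++ (l1 ++ l2) :: (v.map Prod.snd)
                  = (q.map Prod.snd) ++ l2 :: ((w.map Prod.snd) ++ (l1 ++ l2) :: (v.map Prod.snd)) from by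
                simp, pv_erase_mid]
            rw [hA, hB]
            dsimp only
            exact pv_inv_mergeR hve hnk hdj hnames hcc1 hbs hbn hitems
          · -- keep c2 (the left one)
            have hA : pvJoinBoxes a b circuits bc cc =
                ((circuits.insert c2 (l2 ++ l1)).erase c1,
                 l1.foldl (fun d bx => d.insert bx c2) bc, cc) := by
              simp [pvJoinBoxes, hca, hcb, hgda, hgdb, hc1ne, hc2ne, hc12, hlen,
                (show l1.length ≤ l2.length by omega), hgdc1, hgdc2]
            have hB : pvJoin comps a b =
                (q.map Prod.snd) ++ (l2 ++ l1) :: ((w.map Prod.snd) ++ (v.map Prod.snd)) := by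
              unfold pvJoin
              rw [hfia, hfib]
              dsimp only
              rw [if_neg hij, hgdi, hgdj, if_neg (by omega), hcompsd, pv_set_mid]
              rw [show (q.map Prod.snd) ++ (l2 ++ l1) :: ((w.map Prod.snd) ++ l1 :: (v.map Prod.snd))
                  = ((q.map Prod.snd) ++ (l2 ++ l1) :: (w.map Prod.snd)) ++ l1 :: (v.map Prod.snd) from by
                simp]
              rw [show ((q.map Prod.snd) ++ l2 :: (w.map Prod.snd)).length
                  = ((q.map Prod.snd) ++ (l2 ++ l1) :: (w.map Prod.snd)).length from by
                simp, pv_erase_mid]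
              simp
            rw [hA, hB]
            dsimp only
            exact pv_inv_mergeL hve hnk hdj hnames hcc1 hbs hbn hitems
        · rcases List.mem_cons.1 hmv with heq | hmv2
          · exfalso
            have hfst := congrArg Prod.fst heq
            simp only [] at hfst
            exact hc12 hfst.symm
          · -- c1 comes BEFORE c2 in the dict
            obtain ⟨q, w, hqw⟩ := List.append_of_mem hmv2
            have hitems : circuits.items = u ++ (c1, l1) :: (q ++ (c2, l2) :: w) := by
              rw [hitems0, hqw]
            have hcompsd : comps = (u.map Prod.snd) ++ l1 ::
                ((q.map Prod.snd) ++ l2 :: (w.map Prod.snd)) := by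
              rw [← hve]; unfold PySem.Dict.values; rw [hitems]; simp
            have hfia : comps.findIdx? (fun c => c.contains a) = some (u.map Prod.snd).length :=
              pv_findIdx?_of_mem hdj (by rw [hcompsd]; exact pv_getElem?_mid _ _ _) hal1
            have hfib : comps.findIdx? (fun c => c.contains b)
                = some ((u.map Prod.snd) ++ l1 :: (q.map Prod.snd)).length :=
              pv_findIdx?_of_mem hdj (by
                rw [hcompsd, show (u.map Prod.snd) ++ l1 :: ((q.map Prod.snd) ++ l2 :: (w.map Prod.snd))
                    = ((u.map Prod.snd) ++ l1 :: (q.map Prod.snd)) ++ l2 :: (w.map Prod.snd) from by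
                  simp]
                exact pv_getElem?_mid _ _ _) hbl2
            have hij : ¬ (u.map Prod.snd).length
                = ((u.map Prod.snd) ++ l1 :: (q.map Prod.snd)).length := by
              simp only [List.length_append, List.length_cons]
              omega
            have hgdi : comps.getD (u.map Prod.snd).length [] = l1 := by
              rw [hcompsd]; exact pv_getD_mid _ _ _
            have hgdj : comps.getD ((u.map Prod.snd) ++ l1 :: (q.map Prod.snd)).length [] = l2 := by
              rw [hcompsd, show (u.map Prod.snd) ++ l1 :: ((q.map Prod.snd) ++ l2 :: (w.map Prod.snd))
                  = ((u.map Prod.snd) ++ l1 :: (q.map Prod.snd)) ++ l2 :: (w.map Prod.snd) from by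
                simp]
              exact pv_getD_mid _ _ _
            by_cases hlen : l2.length < l1.length
            · -- keep c1 (the left one)
              have hA : pvJoinBoxes a b circuits bc cc =
                  ((circuits.insert c1 (l1 ++ l2)).erase c2,
                   l2.foldl (fun d bx => d.insert bx c1) bc, cc) := by
                simp [pvJoinBoxes, hca, hcb, hgda, hgdb, hc1ne, hc2ne, hc12, hlen,
                  (show ¬ l1.length ≤ l2.length by omega), hgdc1, hgdc2]
              have hB : pvJoin comps a b =
                  (u.map Prod.snd) ++ (l1 ++ l2) :: ((q.map Prod.snd) ++ (w.map Prod.snd)) := by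
                unfold pvJoin
                rw [hfia, hfib]
                dsimp only
                rw [if_neg hij, hgdi, hgdj, if_pos hlen, hcompsd, pv_set_mid]
                rw [show (u.map Prod.snd) ++ (l1 ++ l2) :: ((q.map Prod.snd) ++ l2 :: (w.map Prod.snd))
                    = ((u.map Prod.snd) ++ (l1 ++ l2) :: (q.map Prod.snd)) ++ l2 :: (w.map Prod.snd) from by
                  simp]
                rw [show ((u.map Prod.snd) ++ l1 :: (q.map Prod.snd)).length
                    = ((u.map Prod.snd) ++ (l1 ++ l2) :: (q.map Prod.snd)).length from by
                  simp, pv_erase_mid]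
                simp
              rw [hA, hB]
              dsimp only
              exact pv_inv_mergeL hve hnk hdj hnames hcc1 hbs hbn hitems
            · -- keep c2 (the right one)
              have hA : pvJoinBoxes a b circuits bc cc =
                  ((circuits.insert c2 (l2 ++ l1)).erase c1,
                   l1.foldl (fun d bx => d.insert bx c2) bc, cc) := by
                simp [pvJoinBoxes, hca, hcb, hgda, hgdb, hc1ne, hc2ne, hc12, hlen,
                  (show l1.length ≤ l2.length by omega), hgdc1, hgdc2]
              have hB : pvJoin comps a b =
                  (u.map Prod.snd) ++ ((q.map Prod.snd) ++ (l2 ++ l1) :: (w.map Prod.snd)) := by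
                unfold pvJoin
                rw [hfia, hfib]
                dsimp only
                rw [if_neg hij, hgdi, hgdj, if_neg (by omega)]
                rw [hcompsd, show (u.map Prod.snd) ++ l1 :: ((q.map Prod.snd) ++ l2 :: (w.map Prod.snd))
                    = ((u.map Prod.snd) ++ l1 :: (q.map Prod.snd)) ++ l2 :: (w.map Prod.snd) from by
                  simp, pv_set_mid]
                rw [show ((u.map Prod.snd) ++ l1 :: (q.map Prod.snd)) ++ (l2 ++ l1) :: (w.map Prod.snd)
                    = (u.map Prod.snd) ++ l1 :: ((q.map Prod.snd) ++ (l2 ++ l1) :: (w.map Prod.snd)) from by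
                  simp, pv_erase_mid]
              rw [hA, hB]
              dsimp only
              exact pv_inv_mergeR hve hnk hdj hnames hcc1 hbs hbn hitems

-- ---- loop shapes ----
def pvStepA (st : PySem.Dict String (List Int) × PySem.Dict Int String × Int)
    (e : Int × Int) : PySem.Dict String (List Int) × PySem.Dict Int String × Int :=
  pvJoinBoxes e.1 e.2 st.1 st.2.1 st.2.2

def pvStepB (comps : List (List Int)) (e : Int × Int) : List (List Int) :=
  pvJoin comps e.1 e.2

theorem pv_loopA_stop {n : Int} {dmap : PySem.Dict Int (Int × Int)} :
    ∀ (keys : List Int) (st : PySem.Dict String (List Int) × PySem.Dict Int String × Int × Int),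
    n ≤ st.2.2.2 → keys.foldl (pvLoopA n dmap) st = st := by
  intro keys
  induction keys with
  | nil => intro st _; rfl
  | cons k ks ih =>
    intro st hst
    obtain ⟨c, bcd, cc, j⟩ := st
    simp only [List.foldl_cons]
    rw [show pvLoopA n dmap (c, bcd, cc, j) k = (c, bcd, cc, j) by
      unfold pvLoopA
      exact if_neg (by simp only [] at hst ⊢; omega)]
    exact ih _ hst

theorem pv_loopA_take (n : Int) (dmap : PySem.Dict Int (Int × Int)) :
    ∀ (keys : List Int) (circuits : PySem.Dict String (List Int))
      (bc : PySem.Dict Int String) (cc j : Int),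
    ∃ j', keys.foldl (pvLoopA n dmap) (circuits, bc, cc, j) =
      (((keys.take (n - j).toNat).map (fun d => dmap.getD d (0, 0))).foldl pvStepA
          (circuits, bc, cc)
        |> (fun r => (r.1, r.2.1, r.2.2, j'))) := by
  intro keys
  induction keys with
  | nil => intro c bcd cc j; exact ⟨j, by simp⟩
  | cons k ks ih =>
    intro c bcd cc j
    by_cases hj : j < n
    · have htake : (n - j).toNat = (n - (j + 1)).toNat + 1 := by omega
      simp only [List.foldl_cons]
      rw [show pvLoopA n dmap (c, bcd, cc, j) k =
        (pvStepA (c, bcd, cc) (dmap.getD k (0, 0)) |>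
          (fun r => (r.1, r.2.1, r.2.2, j + 1))) by
          unfold pvLoopA pvStepA
          exact if_pos hj]
      obtain ⟨j', hj'⟩ := ih (pvStepA (c, bcd, cc) (dmap.getD k (0, 0))).1
        (pvStepA (c, bcd, cc) (dmap.getD k (0, 0))).2.1
        (pvStepA (c, bcd, cc) (dmap.getD k (0, 0))).2.2 (j + 1)
      refine ⟨j', ?_⟩
      rw [htake]
      simp only [List.take_succ_cons, List.map_cons, List.foldl_cons]
      exact hj'
    · have htake : (n - j).toNat = 0 := by omega
      refine ⟨j, ?_⟩
      rw [pv_loopA_stop (k :: ks) (c, bcd, cc, j) (by simp only []; omega), htake]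
      rfl

theorem pv_fold_inv (E : List (Int × Int)) :
    ∀ {circuits : PySem.Dict String (List Int)} {bc : PySem.Dict Int String} {cc : Int}
      {comps : List (List Int)}, pvInv circuits bc cc comps →
    pvInv (E.foldl pvStepA (circuits, bc, cc)).1 (E.foldl pvStepA (circuits, bc, cc)).2.1
      (E.foldl pvStepA (circuits, bc, cc)).2.2 (E.foldl pvStepB comps) := by
  induction E with
  | nil => intro _ _ _ _ h; exact h
  | cons e E ih =>
    intro c bcd cc comps h
    simp only [List.foldl_cons]
    have hstep := pv_step_inv e.1 e.2 h
    exact ih hstep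

theorem pv_inv_init : pvInv PySem.Dict.empty PySem.Dict.empty 1 [] := by
  constructor <;> simp [PySem.Dict.values, PySem.Dict.keys, PySem.Dict.get?, PySem.Dict.empty]

-- ---- final slice: xs[len-3:len] = xs[len-3:] for every length ----
theorem pv_slice_stop_len (xs : List Int) (a : Int) :
    PySem.List.slice xs (some a) (some (PySem.List.len xs)) =
      PySem.List.slice xs (some a) none := by
  rw [PySem.List.len_eq, PySem.List.slice_some_none]
  simp [PySem.List.slice]

-- ---- master reduction of both ports ----
theorem pv_master (n : Int) (distances : List (Int × Int × Int)) :
    find_circuits_after_n_joins n distances = find_circuits_after_n_joins_alt n distances := by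
  classical
  set dmap := PySem.Dict.ofList (distances.map (fun t => (t.1, (t.2.1, t.2.2)))) with hdmap
  set keys := PySem.List.sorted dmap.keys (fun x => x) false with hkeys
  set E0 : List (Int × Int) := (keys.take n.toNat).map (fun d => dmap.getD d (0, 0)) with hE0
  set comps := E0.foldl pvStepB [] with hcomps
  have hInv := pv_fold_inv E0 pv_inv_init
  obtain ⟨j', hfoldA⟩ := pv_loopA_take n dmap keys PySem.Dict.empty PySem.Dict.empty 1 0
  have hsub : ((n : Int) - 0).toNat = n.toNat := by omega
  rw [hsub, ← hE0] at hfoldA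
  have hfoldB : (PySem.List.slice keys none (some (max n 0))).foldl (pvLoopB dmap) []
      = comps := by
    rw [PySem.List.slice_to keys (le_max_right n 0)]
    have : (max n 0).toNat = n.toNat := by omega
    rw [this, hcomps, hE0, List.foldl_map]
    rfl
  show find_circuits_after_n_joins n distances = _
  unfold find_circuits_after_n_joins find_circuits_after_n_joins_alt
  dsimp only
  rw [← hdmap, ← hkeys, hfoldA, hfoldB]
  dsimp only
  rw [PySem.List.foldl_append_singleton_eq_map, List.nil_append]
  have hveq : (List.foldl pvStepA (PySem.Dict.empty, PySem.Dict.empty, 1) E0).1.values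
      = comps := hInv.values_eq
  rw [hveq]
  rw [pv_slice_stop_len]

-- ===== VERDICT (by name: the statement is the Claim_ definition above) =====
theorem find_circuits_after_n_joins_spec : Claim_equal_find_circuits_after_n_joins := by
  intro n distances _
  exact pv_master n distances
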